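-- pv_equiv track=rewrite | github.com/TanelPaal/Programming-Introductory-Course | TK/tk4/exam.py | count_clumps
-- ===== SOURCE A (Python) =====
-- def count_clumps(nums: list) -> int:
--     """
--     Return the number of clumps in the given list.
--
--     Say that a "clump" in a list is a series of 2 or more adjacent elements of the same value.
--
--     count_clumps([1, 2, 2, 3, 4, 4]) → 2
--     count_clumps([1, 1, 2, 1, 1]) → 2
--     count_clumps([1, 1, 1, 1, 1]) → 1
--     count_clumps([1, 2, 3]) → 0
--
--     :param nums: List of integers.
--     :return: Number of clumps.
--     """
--     clump_count = 0
--     in_clump = False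
--
--     for i in range(len(nums) - 1):
--         if nums[i] == nums[i + 1] and not in_clump:
--             clump_count += 1
--             in_clump = True
--         elif nums[i] != nums[i + 1]:
--             in_clump = False
--
--     return clump_count
-- ===== SOURCE B (Python) =====
-- def count_clumps(nums: list) -> int:
--     """Build the run-lengths of maximal adjacent equal runs, then count runs of length >= 2."""
--     lengths = []
--     cur = None  # (value, length) of the current run
--     for x in nums:
--         if cur is not None and cur[0] == x:
--             cur = (x, cur[1] + 1)
--         else:
--             if cur is not None:
--                 lengths.append(cur[1])
--             cur = (x, 1)
--     if cur is not None:
--         lengths.append(cur[1])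
--     return sum(1 for n in lengths if n >= 2)
-- ===== Notes on version B (the rewrite author's own statement) =====
-- stated objective: alternative
-- what changed: B partitions the list into maximal runs of equal adjacent values (collecting run lengths in one pass) and counts runs of length >= 2, instead of A's index-based adjacent-pair scan with an in_clump flag.
import Mathlib
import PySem

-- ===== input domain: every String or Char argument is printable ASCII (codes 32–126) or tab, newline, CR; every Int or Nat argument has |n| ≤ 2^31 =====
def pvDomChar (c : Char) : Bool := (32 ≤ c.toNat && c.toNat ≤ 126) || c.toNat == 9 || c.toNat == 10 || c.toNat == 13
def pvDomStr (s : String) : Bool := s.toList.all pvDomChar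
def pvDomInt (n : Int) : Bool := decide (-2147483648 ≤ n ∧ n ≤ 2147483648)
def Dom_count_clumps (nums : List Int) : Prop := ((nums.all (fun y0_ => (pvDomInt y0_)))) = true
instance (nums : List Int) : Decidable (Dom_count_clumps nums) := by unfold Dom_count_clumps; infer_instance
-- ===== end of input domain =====

-- B builds the run-lengths of maximal adjacent equal runs and counts runs of length ≥ 2,
-- instead of A's index-based adjacent-pair scan with an in_clump flag (alternative decomposition, same cost).


-- ===== PORT A =====
-- loop body of A's for-loop over i in range(len(nums)-1); state = (clump_count, in_clump)
-- (indices i and i+1 are always in range here, so pyGetD's default is never used — exact)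
def aStep (nums : List Int) (st : Int × Bool) (i : Int) : Int × Bool :=
  if PySem.List.pyGetD nums i 0 = PySem.List.pyGetD nums (i + 1) 0 ∧ st.2 = false then
    (st.1 + 1, true)
  else if PySem.List.pyGetD nums i 0 ≠ PySem.List.pyGetD nums (i + 1) 0 then
    (st.1, false)
  else st

def count_clumps (nums : List Int) : Int :=
  ((PySem.List.pyRange 0 (PySem.List.len nums - 1) 1).foldl (aStep nums) (0, false)).1

-- ===== PORT B =====
-- loop body of B's for-loop over x in nums; state = (lengths, cur)
def bStep (st : List Int × Option (Int × Int)) (x : Int) : List Int × Option (Int × Int) :=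
  match st with
  | (ls, some (v, c)) => if v = x then (ls, some (v, c + 1)) else (ls ++ [c], some (x, 1))
  | (ls, none) => (ls, some (x, 1))

def count_clumps_alt (nums : List Int) : Int :=
  let st := nums.foldl bStep ([], none)
  let lengths := match st.2 with
    | some (_, c) => st.1 ++ [c]
    | none => st.1
  ((lengths.filter (fun n => 2 ≤ n)).length : Int)

-- ===== PRECONDITION & SPEC =====
def Spec_count_clumps (nums : List Int) (out : Int) : Prop := out = count_clumps_alt nums
instance (nums : List Int) (out : Int) : Decidable (Spec_count_clumps nums out) := by unfold Spec_count_clumps; infer_instance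

-- ===== CLAIM (what is proved, stated in full; the proofs are below) =====
def Claim_equal_count_clumps : Prop := ∀ (nums : List Int), Dom_count_clumps nums → Spec_count_clumps nums (count_clumps nums)

-- ===== LEMMAS AND PROOFS =====

-- common abstraction: scan of adjacent pairs carrying the in_clump flag
def pairScan : List Int → Bool → Int
  | [], _ => 0
  | [_], _ => 0
  | x :: y :: t, flag =>
      if x = y ∧ flag = false then 1 + pairScan (y :: t) true
      else if x ≠ y then pairScan (y :: t) false
      else pairScan (y :: t) flag

lemma pairScan_short (xs : List Int) (flag : Bool) (h : xs.length ≤ 1) : pairScan xs flag = 0 := by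
  match xs with
  | [] => rfl
  | [_] => rfl
  | _ :: _ :: _ => simp at h

lemma foldA (nums : List Int) (k : Nat) : ∀ (a : Nat) (c : Int) (flag : Bool),
    nums.length - a ≤ k →
    ((PySem.List.pyRange (a : Int) (PySem.List.len nums - 1) 1).foldl (aStep nums) (c, flag)).1
      = c + pairScan (nums.drop a) flag := by
  induction k with
  | zero =>
      intro a c flag h
      rw [PySem.List.pyRange_one_eq_nil (by simp only [PySem.List.len]; omega)]
      rw [pairScan_short _ _ (by simp; omega)]
      simp
  | succ k ih =>
      intro a c flag h
      by_cases hlt : a + 1 < nums.length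
      · rw [PySem.List.pyRange_one_cons (by simp only [PySem.List.len]; omega)]
        have ha : a < nums.length := by omega
        have hga : PySem.List.pyGetD nums (a : Int) 0 = nums[a] := by
          rw [PySem.List.pyGetD_eq_getElem nums 0 (by omega) (by exact_mod_cast ha)]
          simp
        have hga1 : PySem.List.pyGetD nums ((a : Int) + 1) 0 = nums[a + 1] := by
          rw [PySem.List.pyGetD_eq_getElem nums 0 (by omega) (by exact_mod_cast hlt)]
          have : ((a : Int) + 1).toNat = a + 1 := by omega
          simp [this]
        have hdrop : nums.drop a = nums[a] :: nums.drop (a + 1) := List.drop_eq_getElem_cons ha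
        have hdrop1 : nums.drop (a + 1) = nums[a + 1] :: nums.drop (a + 2) :=
          List.drop_eq_getElem_cons hlt
        have hcast : ((a : Int) + 1) = ((a + 1 : Nat) : Int) := by push_cast; ring
        simp only [List.foldl_cons]
        by_cases heq : nums[a] = nums[a + 1]
        · by_cases hf : flag = false
          · have hs : aStep nums (c, flag) (a : Int) = (c + 1, true) := by
              simp [aStep, hga, hga1, heq, hf]
            rw [hs, hcast, ih (a + 1) (c + 1) true (by omega), hdrop, hdrop1]
            simp [pairScan, heq, hf]
            omega
          · have hft : flag = true := by cases flag with | false => exact absurd rfl hf | true => rfl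
            have hs : aStep nums (c, flag) (a : Int) = (c, flag) := by
              simp [aStep, hga, hga1, heq, hft]
            rw [hs, hcast, ih (a + 1) c flag (by omega), hdrop, hdrop1]
            simp [pairScan, heq, hft]
        · have hs : aStep nums (c, flag) (a : Int) = (c, false) := by
            simp [aStep, hga, hga1, heq]
          rw [hs, hcast, ih (a + 1) c false (by omega), hdrop, hdrop1]
          simp [pairScan, heq]
      · rw [PySem.List.pyRange_one_eq_nil (by simp only [PySem.List.len]; omega)]
        rw [pairScan_short _ _ (by simp; omega)]
        simp

-- count of runs with length ≥ 2 among a finished list of run lengths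
def countGe2 (ls : List Int) : Int := ((ls.filter (fun n => 2 ≤ n)).length : Int)

lemma countGe2_append (ls : List Int) (c : Int) :
    countGe2 (ls ++ [c]) = countGe2 ls + (if 2 ≤ c then 1 else 0) := by
  by_cases h : (2 : Int) ≤ c <;> simp [countGe2, List.filter_append, h]

-- final flush of B's state
def flushB (st : List Int × Option (Int × Int)) : Int :=
  match st.2 with
  | some (_, c) => countGe2 (st.1 ++ [c])
  | none => countGe2 st.1

lemma foldB (t : List Int) : ∀ (ls : List Int) (v c : Int), 1 ≤ c →
    flushB (t.foldl bStep (ls, some (v, c)))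
      = countGe2 ls + (if 2 ≤ c then 1 else 0) + pairScan (v :: t) (decide (2 ≤ c)) := by
  induction t with
  | nil =>
      intro ls v c _
      simp [flushB, countGe2_append, pairScan]
  | cons y t ih =>
      intro ls v c hc
      by_cases heq : v = y
      · have hb : bStep (ls, some (v, c)) y = (ls, some (v, c + 1)) := by
          simp [bStep, heq]
        simp only [List.foldl_cons, hb]
        rw [ih ls v (c + 1) (by omega)]
        subst heq
        have h2 : (2 : Int) ≤ c + 1 := by omega
        by_cases hf : (2 : Int) ≤ c
        · simp [pairScan, h2, hf]
        · simp [pairScan, h2, hf]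
          omega
      · have hb : bStep (ls, some (v, c)) y = (ls ++ [c], some (y, 1)) := by
          simp [bStep, heq]
        simp only [List.foldl_cons, hb]
        rw [ih (ls ++ [c]) y 1 (by omega), countGe2_append]
        simp [pairScan, heq]

theorem main_eq (nums : List Int) : count_clumps nums = count_clumps_alt nums := by
  cases nums with
  | nil => rfl
  | cons x t =>
      have hA : count_clumps (x :: t) = pairScan (x :: t) false := by
        have := foldA (x :: t) (x :: t).length 0 0 false (by omega)
        simpa [count_clumps] using this
      have hB : count_clumps_alt (x :: t) = pairScan (x :: t) false := by
        have h0 : (x :: t).foldl bStep ([], none) = t.foldl bStep ([], some (x, 1)) := by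
          simp [bStep]
        have h2 : count_clumps_alt (x :: t) = flushB ((x :: t).foldl bStep ([], none)) := by
          rcases hst : ((x :: t).foldl bStep ([], none)) with ⟨ls, o⟩
          rcases o with _ | ⟨v, c⟩ <;> simp [count_clumps_alt, flushB, hst, countGe2]
        rw [h2, h0, foldB t [] x 1 (by omega)]
        norm_num [countGe2]
      rw [hA, hB]

-- ===== VERDICT (by name: the statement is the Claim_ definition above) =====
theorem count_clumps_spec : Claim_equal_count_clumps := by
  intro nums _
  unfold Spec_count_clumps
  exact main_eq nums
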